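-- pv_equiv track=rewrite | github.com/danielbom/codewars | Python/6 - kyu/6 kyu - Coding 3min - Virus in Apple.py | infect_apple
-- ===== SOURCE A (Python) =====
-- MOVES = ((0,1), (1,0), (0,-1), (-1,0))
--
-- def infect_apple(apple,n):
--     def isVirusAround(x,y):
--         return any( 0<=x+dx<len(apple) and 0<=y+dy<len(apple[0]) and apple[x+dx][y+dy]=='V'
--                     for dx,dy in MOVES)
--     for _ in range(n):
--         apple = [['V' if c=='V' or isVirusAround(x,y) else 'A' for y,c in enumerate(r)]
--                  for x,r in enumerate(apple) ]
--     return apple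
-- ===== SOURCE B (Python) =====
-- def infect_apple(apple, n):
--     if n <= 0:
--         return apple
--     viruses = [(i, j) for i, row in enumerate(apple)
--                for j, c in enumerate(row) if c == 'V']
--     return [['V' if any(abs(x - i) + abs(y - j) <= n for i, j in viruses) else 'A'
--              for y in range(len(row))]
--             for x, row in enumerate(apple)]
-- ===== Notes on version B (the rewrite author's own statement) =====
-- stated objective: faster
-- what changed: B drops the n-round simulation loop entirely: it collects the virus coordinates once and marks each cell V exactly when its Manhattan distance to the nearest virus is at most n, so the cost no longer depends on n.
-- outside the precondition, e.g. on infect_apple([['A'], ['A', 'V']], 1): A returns [['A'], ['A', 'V']], B returns [['A'], ['V', 'V']]; on infect_apple([['A', 'A'], ['V']], 1): A raises IndexError, B returns [['V', 'A'], ['V']]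
import Mathlib
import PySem

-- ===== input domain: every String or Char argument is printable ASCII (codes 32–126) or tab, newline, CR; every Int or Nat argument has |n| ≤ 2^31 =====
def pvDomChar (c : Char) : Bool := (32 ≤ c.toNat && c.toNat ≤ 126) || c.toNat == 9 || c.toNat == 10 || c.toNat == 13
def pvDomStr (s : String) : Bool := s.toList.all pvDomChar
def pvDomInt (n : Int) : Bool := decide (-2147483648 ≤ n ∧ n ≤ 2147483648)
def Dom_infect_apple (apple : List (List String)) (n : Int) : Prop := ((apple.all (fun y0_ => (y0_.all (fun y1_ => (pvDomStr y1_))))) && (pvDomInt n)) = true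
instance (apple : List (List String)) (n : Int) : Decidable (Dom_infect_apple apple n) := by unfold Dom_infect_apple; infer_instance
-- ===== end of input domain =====

-- B replaces A's n-round cellwise simulation by a single pass keyed on the Manhattan
-- distance to the nearest virus, so the work no longer depends on n (objective: faster).

-- ===== PORT A =====
def pvMOVES : List (Int × Int) := [(0, 1), (1, 0), (0, -1), (-1, 0)]

-- isVirusAround: the pyGet? defaults are never reached — the decide-guards before them
-- replicate Python's 0<=x+dx<len(apple) and 0<=y+dy<len(apple[0]) short-circuit checks.
def pvIsVirusAround (apple : List (List String)) (x y : Int) : Bool :=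
  pvMOVES.any (fun d =>
    decide (0 ≤ x + d.1) && decide (x + d.1 < (apple.length : Int)) &&
    decide (0 ≤ y + d.2) && decide (y + d.2 < ((apple.headD []).length : Int)) &&
    ((PySem.List.pyGet? ((PySem.List.pyGet? apple (x + d.1)).getD []) (y + d.2)).getD "" == "V"))

-- one pass of A's loop body (the two nested comprehensions)
def pvStep (apple : List (List String)) : List (List String) :=
  (PySem.List.enumerate apple).map (fun xr =>
    (PySem.List.enumerate xr.2).map (fun yc =>
      if yc.2 == "V" || pvIsVirusAround apple xr.1 yc.1 then "V" else "A"))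

def infect_apple (apple : List (List String)) (n : Int) : List (List String) :=
  (PySem.List.pyRange 0 n 1).foldl (fun g _ => pvStep g) apple

-- ===== PORT B =====
def altViruses (apple : List (List String)) : List (Int × Int) :=
  (PySem.List.enumerate apple).flatMap (fun ir =>
    (PySem.List.enumerate ir.2).filterMap (fun jc =>
      if jc.2 == "V" then some (ir.1, jc.1) else none))

def infect_apple_alt (apple : List (List String)) (n : Int) : List (List String) :=
  if n ≤ 0 then apple
  else
    let viruses := altViruses apple
    (PySem.List.enumerate apple).map (fun xr =>
      (PySem.List.pyRange 0 (xr.2.length : Int) 1).map (fun y =>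
        if viruses.any (fun ij => decide (|xr.1 - ij.1| + |y - ij.2| ≤ n)) then "V" else "A"))

-- ===== PRECONDITION & SPEC =====
-- Pre_ excludes ragged grids (rows of unequal length) when n ≥ 1: there A either raises
-- IndexError (a row shorter than the first gets probed) or applies the FIRST row's length
-- as the column bound to every row — a malformed-input corner the kata never specifies.
def Pre_infect_apple (apple : List (List String)) (n : Int) : Prop :=
  n ≤ 0 ∨ ∀ r ∈ apple, r.length = (apple.headD []).length
instance (apple : List (List String)) (n : Int) : Decidable (Pre_infect_apple apple n) := by unfold Pre_infect_apple; infer_instance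

def pvWitness_infect_apple : List (List String) × Int := ([["V", "A"], ["A", "A"]], 2)

def Spec_infect_apple (apple : List (List String)) (n : Int) (out : List (List String)) : Prop := out = infect_apple_alt apple n
instance (apple : List (List String)) (n : Int) (out : List (List String)) : Decidable (Spec_infect_apple apple n out) := by unfold Spec_infect_apple; infer_instance

-- ===== CLAIM (what is proved, stated in full; the proofs are below) =====
def Claim_equal_infect_apple : Prop := ∀ (apple : List (List String)) (n : Int), Dom_infect_apple apple n → Pre_infect_apple apple n → Spec_infect_apple apple n (infect_apple apple n)

-- ===== LEMMAS AND PROOFS =====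

-- "some virus of `apple` lies within Manhattan distance k of (x, y)"
def pvNear (apple : List (List String)) (k x y : Int) : Prop :=
  ∃ i j : Nat, i < apple.length ∧ j < (apple.getD i []).length ∧
    (apple.getD i []).getD j "" = "V" ∧ |x - (i : Int)| + |y - (j : Int)| ≤ k

-- the grid B produces for bound k, named for the induction on the number of steps
def pvSpecGrid (apple : List (List String)) (k : Int) : List (List String) :=
  (PySem.List.enumerate apple).map (fun xr =>
    (PySem.List.pyRange 0 (xr.2.length : Int) 1).map (fun y =>
      if (altViruses apple).any (fun ij => decide (|xr.1 - ij.1| + |y - ij.2| ≤ k)) then "V" else "A"))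

theorem pv_mem_altViruses (a : List (List String)) (p : Int × Int) :
    p ∈ altViruses a ↔ ∃ i j : Nat, i < a.length ∧ j < (a.getD i []).length ∧
      (a.getD i []).getD j "" = "V" ∧ p = ((i : Int), (j : Int)) := by
  constructor
  · intro hp
    rw [altViruses, List.mem_flatMap] at hp
    obtain ⟨ir, hir, hp⟩ := hp
    rw [PySem.List.mem_enumerate_iff] at hir
    obtain ⟨i, hi, rfl⟩ := hir
    rw [List.mem_filterMap] at hp
    obtain ⟨jc, hjc, hpj⟩ := hp
    rw [PySem.List.mem_enumerate_iff] at hjc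
    obtain ⟨j, hj, rfl⟩ := hjc
    by_cases hV : (a[i][j] == "V") = true
    · simp only [hV, if_true, Option.some.injEq] at hpj
      refine ⟨i, j, hi, ?_, ?_, ?_⟩
      · rwa [List.getD_eq_getElem a [] hi]
      · rw [List.getD_eq_getElem a [] hi, List.getD_eq_getElem _ "" hj]
        exact beq_iff_eq.mp hV
      · simpa using hpj.symm
    · simp only [hV] at hpj
      exact absurd hpj (by simp)
  · rintro ⟨i, j, hi, hj, hV, rfl⟩
    rw [List.getD_eq_getElem a [] hi] at hj hV
    rw [altViruses, List.mem_flatMap]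
    refine ⟨((i : Int), a[i]), ?_, ?_⟩
    · rw [PySem.List.mem_enumerate_iff]
      exact ⟨i, hi, by simp⟩
    · rw [List.mem_filterMap]
      refine ⟨((j : Int), a[i][j]), ?_, ?_⟩
      · rw [PySem.List.mem_enumerate_iff]
        exact ⟨j, hj, by simp⟩
      · rw [List.getD_eq_getElem _ "" hj] at hV
        simp [hV]
theorem pv_bInf_iff (a : List (List String)) (k x y : Int) :
    ((altViruses a).any (fun ij => decide (|x - ij.1| + |y - ij.2| ≤ k)) = true) ↔ pvNear a k x y := by
  rw [List.any_eq_true]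
  constructor
  · rintro ⟨p, hp, hd⟩
    rw [pv_mem_altViruses] at hp
    obtain ⟨i, j, hi, hj, hV, rfl⟩ := hp
    exact ⟨i, j, hi, hj, hV, by simpa using hd⟩
  · rintro ⟨i, j, hi, hj, hV, hd⟩
    exact ⟨((i : Int), (j : Int)), (pv_mem_altViruses a _).mpr ⟨i, j, hi, hj, hV, rfl⟩, by simpa using hd⟩

theorem pvStep_length (g : List (List String)) : (pvStep g).length = g.length := by
  simp [pvStep]

theorem pvSpecGrid_length (a : List (List String)) (k : Int) : (pvSpecGrid a k).length = a.length := by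
  simp [pvSpecGrid]

theorem pvStep_getElem? (g : List (List String)) (x : Nat) (hx : x < g.length) :
    (pvStep g)[x]? = some ((PySem.List.enumerate (g[x]'hx)).map
      (fun yc => if yc.2 == "V" || pvIsVirusAround g (x : Int) yc.1 then "V" else "A")) := by
  simp [pvStep, List.getElem?_map, PySem.List.getElem?_enumerate, List.getElem?_eq_getElem hx]

theorem pvSpecGrid_getElem? (a : List (List String)) (k : Int) (x : Nat) (hx : x < a.length) :
    (pvSpecGrid a k)[x]? = some ((PySem.List.pyRange 0 (((a[x]'hx).length : Nat) : Int) 1).map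
      (fun y => if (altViruses a).any (fun ij => decide (|(x : Int) - ij.1| + |y - ij.2| ≤ k)) then "V" else "A")) := by
  simp [pvSpecGrid, List.getElem?_map, PySem.List.getElem?_enumerate, List.getElem?_eq_getElem hx]

theorem pv_around_iff (g : List (List String)) (x y : Int) :
    pvIsVirusAround g x y = true ↔ ∃ d ∈ pvMOVES, 0 ≤ x + d.1 ∧ x + d.1 < (g.length : Int) ∧
      0 ≤ y + d.2 ∧ y + d.2 < ((g.headD []).length : Int) ∧
      (g.getD (x + d.1).toNat []).getD (y + d.2).toNat "" = "V" := by
  rw [pvIsVirusAround, List.any_eq_true]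
  constructor
  · rintro ⟨d, hd, hb⟩
    simp only [Bool.and_eq_true, decide_eq_true_eq, beq_iff_eq] at hb
    obtain ⟨⟨⟨⟨h1, h2⟩, h3⟩, h4⟩, h5⟩ := hb
    refine ⟨d, hd, h1, h2, h3, h4, ?_⟩
    rw [show x + d.1 = (((x + d.1).toNat : Nat) : Int) from (Int.toNat_of_nonneg h1).symm,
        show y + d.2 = (((y + d.2).toNat : Nat) : Int) from (Int.toNat_of_nonneg h3).symm,
        PySem.List.pyGet?_natCast, PySem.List.pyGet?_natCast] at h5
    simpa [List.getD_eq_getElem?_getD] using h5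
  · rintro ⟨d, hd, h1, h2, h3, h4, h5⟩
    refine ⟨d, hd, ?_⟩
    simp only [Bool.and_eq_true, decide_eq_true_eq, beq_iff_eq]
    refine ⟨⟨⟨⟨h1, h2⟩, h3⟩, h4⟩, ?_⟩
    rw [show x + d.1 = (((x + d.1).toNat : Nat) : Int) from (Int.toNat_of_nonneg h1).symm,
        show y + d.2 = (((y + d.2).toNat : Nat) : Int) from (Int.toNat_of_nonneg h3).symm,
        PySem.List.pyGet?_natCast, PySem.List.pyGet?_natCast]
    simpa [List.getD_eq_getElem?_getD] using h5

theorem pv_headD_getD (l : List (List String)) : l.headD [] = l.getD 0 [] := by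
  cases l <;> rfl

theorem pvNear_triangle (a : List (List String)) (k x y x' y' : Int)
    (h : pvNear a k x' y') (hD : |x - x'| + |y - y'| ≤ 1) : pvNear a (k + 1) x y := by
  obtain ⟨i, j, hi, hj, hV, hd⟩ := h
  refine ⟨i, j, hi, hj, hV, ?_⟩
  have t1 : |x - (i : Int)| ≤ |x - x'| + |x' - (i : Int)| := abs_sub_le _ _ _
  have t2 : |y - (j : Int)| ≤ |y - y'| + |y' - (j : Int)| := abs_sub_le _ _ _
  have n1 : (0 : Int) ≤ |x - x'| := abs_nonneg _
  have n2 : (0 : Int) ≤ |y - y'| := abs_nonneg _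
  linarith

theorem pv_cell_iff (a g : List (List String)) (k : Int) (hk : 0 ≤ k)
    (hrect : ∀ r ∈ a, r.length = (a.headD []).length)
    (hlen : g.length = a.length)
    (hrow : ∀ x : Nat, x < a.length → (g.getD x []).length = (a.getD x []).length)
    (hcell : ∀ x y : Nat, x < a.length → y < (a.getD x []).length →
      ((g.getD x []).getD y "" = "V" ↔ pvNear a k (x : Int) (y : Int)))
    (x y : Nat) (hx : x < a.length) (hy : y < (a.getD x []).length) :
    ((g.getD x []).getD y "" = "V" ∨ pvIsVirusAround g (x : Int) (y : Int) = true) ↔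
      pvNear a (k + 1) (x : Int) (y : Int) := by
  have hmemx : a.getD x [] ∈ a := by
    rw [List.getD_eq_getElem a [] hx]; exact a.getElem_mem hx
  have hCx : (a.getD x []).length = (a.headD []).length := hrect _ hmemx
  have h0a : (0 : Nat) < a.length := by omega
  have hmem0 : a.getD 0 [] ∈ a := by
    rw [List.getD_eq_getElem a [] h0a]; exact a.getElem_mem h0a
  have hgH : (g.headD []).length = (a.headD []).length := by
    rw [pv_headD_getD g, hrow 0 h0a]; exact hrect _ hmem0
  have hCof : ∀ x' : Nat, x' < a.length → (a.getD x' []).length = (a.headD []).length := by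
    intro x' hx'
    refine hrect _ ?_
    rw [List.getD_eq_getElem a [] hx']; exact a.getElem_mem hx'
  constructor
  · rintro (hV | hA)
    · obtain ⟨i, j, hi, hj, hVij, hd⟩ := (hcell x y hx hy).mp hV
      exact ⟨i, j, hi, hj, hVij, by linarith⟩
    · rw [pv_around_iff] at hA
      obtain ⟨d, hdmem, h1, h2, h3, h4, h5⟩ := hA
      rw [hgH] at h4
      rw [hlen] at h2
      simp only [pvMOVES, List.mem_cons, List.not_mem_nil, or_false] at hdmem
      rcases hdmem with rfl | rfl | rfl | rfl
      · -- d = (0, 1) : neighbor (x, y+1)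
        have ex : ((x : Int) + (0, (1:Int)).1).toNat = x := by show ((x:Int) + 0).toNat = x; omega
        have ey : ((y : Int) + (0, (1:Int)).2).toNat = y + 1 := by show ((y:Int) + 1).toNat = y + 1; omega
        rw [ex, ey] at h5
        have hb2 : y + 1 < (a.getD x []).length := by
          have h4' : (y:Int) + (0, (1:Int)).2 < ((a.headD []).length : Int) := h4
          simp only [] at h4'
          omega
        have hnear := (hcell x (y + 1) hx hb2).mp h5
        refine pvNear_triangle a k _ _ (x : Int) ((y : Int) + 1) (by exact_mod_cast hnear) ?_
        simp
      · -- d = (1, 0) : neighbor (x+1, y)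
        have ex : ((x : Int) + ((1:Int), (0:Int)).1).toNat = x + 1 := by show ((x:Int) + 1).toNat = x + 1; omega
        have ey : ((y : Int) + ((1:Int), (0:Int)).2).toNat = y := by show ((y:Int) + 0).toNat = y; omega
        rw [ex, ey] at h5
        have hb1 : x + 1 < a.length := by
          have h2' : (x:Int) + ((1:Int), (0:Int)).1 < (a.length : Int) := h2
          simp only [] at h2'
          omega
        have hb2 : y < (a.getD (x + 1) []).length := by rw [hCof (x + 1) hb1]; omega
        have hnear := (hcell (x + 1) y hb1 hb2).mp h5
        refine pvNear_triangle a k _ _ ((x : Int) + 1) (y : Int) (by exact_mod_cast hnear) ?_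
        simp
      · -- d = (0, -1) : neighbor (x, y-1)
        have h3' : (0:Int) ≤ (y:Int) + ((0:Int), (-1:Int)).2 := h3
        simp only [] at h3'
        have ex : ((x : Int) + ((0:Int), (-1:Int)).1).toNat = x := by show ((x:Int) + 0).toNat = x; omega
        have ey : ((y : Int) + ((0:Int), (-1:Int)).2).toNat = y - 1 := by show ((y:Int) + -1).toNat = y - 1; omega
        rw [ex, ey] at h5
        have hb2 : y - 1 < (a.getD x []).length := by omega
        have hnear := (hcell x (y - 1) hx hb2).mp h5
        refine pvNear_triangle a k _ _ (x : Int) ((y - 1 : Nat) : Int) (by exact_mod_cast hnear) ?_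
        have : ((y - 1 : Nat) : Int) = (y : Int) - 1 := by omega
        rw [this]
        simp
      · -- d = (-1, 0) : neighbor (x-1, y)
        have h1' : (0:Int) ≤ (x:Int) + ((-1:Int), (0:Int)).1 := h1
        simp only [] at h1'
        have ex : ((x : Int) + ((-1:Int), (0:Int)).1).toNat = x - 1 := by show ((x:Int) + -1).toNat = x - 1; omega
        have ey : ((y : Int) + ((-1:Int), (0:Int)).2).toNat = y := by show ((y:Int) + 0).toNat = y; omega
        rw [ex, ey] at h5
        have hb1 : x - 1 < a.length := by omega
        have hb2 : y < (a.getD (x - 1) []).length := by rw [hCof (x - 1) hb1]; omega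
        have hnear := (hcell (x - 1) y hb1 hb2).mp h5
        refine pvNear_triangle a k _ _ ((x - 1 : Nat) : Int) (y : Int) (by exact_mod_cast hnear) ?_
        have : ((x - 1 : Nat) : Int) = (x : Int) - 1 := by omega
        rw [this]
        simp
  · rintro ⟨i, j, hi, hj, hVij, hd⟩
    by_cases hle : |(x : Int) - (i : Int)| + |(y : Int) - (j : Int)| ≤ k
    · exact Or.inl ((hcell x y hx hy).mpr ⟨i, j, hi, hj, hVij, hle⟩)
    · right
      rw [pv_around_iff]
      have hjC : j < (a.headD []).length := by rw [← hCof i hi]; exact hj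
      have hyC : y < (a.headD []).length := by rw [← hCx]; exact hy
      have n1 : (0 : Int) ≤ |(x : Int) - (i : Int)| := abs_nonneg _
      have n2 : (0 : Int) ≤ |(y : Int) - (j : Int)| := abs_nonneg _
      rcases Nat.lt_trichotomy i x with hlt | heq | hgt
      · -- i < x : use move (-1, 0)
        have e1 : |(x : Int) - (i : Int)| = (x : Int) - (i : Int) := abs_of_nonneg (by omega)
        refine ⟨((-1 : Int), (0 : Int)), by simp [pvMOVES], ?_, ?_, ?_, ?_, ?_⟩
        · show (0 : Int) ≤ (x : Int) + -1; omega
        · show (x : Int) + -1 < (g.length : Int); rw [hlen]; omega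
        · show (0 : Int) ≤ (y : Int) + 0; omega
        · show (y : Int) + 0 < ((g.headD []).length : Int); rw [hgH]; omega
        · have ex : ((x : Int) + ((-1:Int), (0:Int)).1).toNat = x - 1 := by show ((x:Int) + -1).toNat = x - 1; omega
          have ey : ((y : Int) + ((-1:Int), (0:Int)).2).toNat = y := by show ((y:Int) + 0).toNat = y; omega
          rw [ex, ey]
          have hb1 : x - 1 < a.length := by omega
          refine (hcell (x - 1) y hb1 (by rw [hCof (x - 1) hb1]; omega)).mpr ⟨i, j, hi, hj, hVij, ?_⟩
          have e2 : |((x - 1 : Nat) : Int) - (i : Int)| = ((x - 1 : Nat) : Int) - (i : Int) :=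
            abs_of_nonneg (by omega)
          have e3 : ((x - 1 : Nat) : Int) = (x : Int) - 1 := by omega
          rw [e2, e3]
          rw [e1] at hd hle
          linarith
      · -- i = x : split on j vs y
        subst heq
        have e1 : |(i : Int) - (i : Int)| = 0 := by simp
        rcases Nat.lt_trichotomy j y with hjy | hje | hjy
        · -- j < y : move (0, -1)
          have e2 : |(y : Int) - (j : Int)| = (y : Int) - (j : Int) := abs_of_nonneg (by omega)
          refine ⟨((0 : Int), (-1 : Int)), by simp [pvMOVES], ?_, ?_, ?_, ?_, ?_⟩
          · show (0 : Int) ≤ (i : Int) + 0; omega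
          · show (i : Int) + 0 < (g.length : Int); rw [hlen]; omega
          · show (0 : Int) ≤ (y : Int) + -1; omega
          · show (y : Int) + -1 < ((g.headD []).length : Int); rw [hgH]; omega
          · have ex : ((i : Int) + ((0:Int), (-1:Int)).1).toNat = i := by show ((i:Int) + 0).toNat = i; omega
            have ey : ((y : Int) + ((0:Int), (-1:Int)).2).toNat = y - 1 := by show ((y:Int) + -1).toNat = y - 1; omega
            rw [ex, ey]
            refine (hcell i (y - 1) hx (by omega)).mpr ⟨i, j, hx, hj, hVij, ?_⟩
            have e3 : |((y - 1 : Nat) : Int) - (j : Int)| = ((y - 1 : Nat) : Int) - (j : Int) :=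
              abs_of_nonneg (by omega)
            have e4 : ((y - 1 : Nat) : Int) = (y : Int) - 1 := by omega
            rw [e1, e3, e4]
            rw [e1, e2] at hd
            linarith
        · -- j = y : contradiction with hle (distance 0 ≤ k)
          subst hje
          exact (hle (by simpa using hk)).elim
        · -- y < j : move (0, 1)
          have e2 : |(y : Int) - (j : Int)| = -((y : Int) - (j : Int)) := abs_of_nonpos (by omega)
          have hjCx : j < (a.getD i []).length := hj
          refine ⟨((0 : Int), (1 : Int)), by simp [pvMOVES], ?_, ?_, ?_, ?_, ?_⟩
          · show (0 : Int) ≤ (i : Int) + 0; omega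
          · show (i : Int) + 0 < (g.length : Int); rw [hlen]; omega
          · show (0 : Int) ≤ (y : Int) + 1; omega
          · show (y : Int) + 1 < ((g.headD []).length : Int); rw [hgH]; omega
          · have ex : ((i : Int) + ((0:Int), (1:Int)).1).toNat = i := by show ((i:Int) + 0).toNat = i; omega
            have ey : ((y : Int) + ((0:Int), (1:Int)).2).toNat = y + 1 := by show ((y:Int) + 1).toNat = y + 1; omega
            rw [ex, ey]
            refine (hcell i (y + 1) hx (by omega)).mpr ⟨i, j, hx, hj, hVij, ?_⟩
            have e3 : |((y + 1 : Nat) : Int) - (j : Int)| = -(((y + 1 : Nat) : Int) - (j : Int)) :=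
              abs_of_nonpos (by push_cast; omega)
            have e4 : ((y + 1 : Nat) : Int) = (y : Int) + 1 := by omega
            rw [e1, e3, e4]
            rw [e1, e2] at hd
            linarith
      · -- x < i : use move (1, 0)
        have e1 : |(x : Int) - (i : Int)| = -((x : Int) - (i : Int)) := abs_of_nonpos (by omega)
        refine ⟨((1 : Int), (0 : Int)), by simp [pvMOVES], ?_, ?_, ?_, ?_, ?_⟩
        · show (0 : Int) ≤ (x : Int) + 1; omega
        · show (x : Int) + 1 < (g.length : Int); rw [hlen]; omega
        · show (0 : Int) ≤ (y : Int) + 0; omega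
        · show (y : Int) + 0 < ((g.headD []).length : Int); rw [hgH]; omega
        · have ex : ((x : Int) + ((1:Int), (0:Int)).1).toNat = x + 1 := by show ((x:Int) + 1).toNat = x + 1; omega
          have ey : ((y : Int) + ((1:Int), (0:Int)).2).toNat = y := by show ((y:Int) + 0).toNat = y; omega
          rw [ex, ey]
          have hb1 : x + 1 < a.length := by omega
          refine (hcell (x + 1) y hb1 (by rw [hCof (x + 1) hb1]; omega)).mpr ⟨i, j, hi, hj, hVij, ?_⟩
          have e2 : |((x + 1 : Nat) : Int) - (i : Int)| = -(((x + 1 : Nat) : Int) - (i : Int)) :=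
            abs_of_nonpos (by push_cast; omega)
          have e3 : ((x + 1 : Nat) : Int) = (x : Int) + 1 := by omega
          rw [e2, e3]
          rw [e1] at hd
          linarith

theorem pv_step_spec (a g : List (List String)) (k : Int) (hk : 0 ≤ k)
    (hrect : ∀ r ∈ a, r.length = (a.headD []).length)
    (hlen : g.length = a.length)
    (hrow : ∀ x : Nat, x < a.length → (g.getD x []).length = (a.getD x []).length)
    (hcell : ∀ x y : Nat, x < a.length → y < (a.getD x []).length →
      ((g.getD x []).getD y "" = "V" ↔ pvNear a k (x : Int) (y : Int))) :
    pvStep g = pvSpecGrid a (k + 1) := by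
  apply List.ext_getElem?
  intro x
  by_cases hx : x < a.length
  · have hxg : x < g.length := by omega
    rw [pvStep_getElem? g x hxg, pvSpecGrid_getElem? a (k + 1) x hx]
    refine congrArg some ?_
    have hgrow : (g[x]'hxg).length = (a[x]'hx).length := by
      have h := hrow x hx
      rwa [List.getD_eq_getElem g [] hxg, List.getD_eq_getElem a [] hx] at h
    apply List.ext_getElem?
    intro y
    rw [List.getElem?_map, List.getElem?_map]
    by_cases hy : y < (a[x]'hx).length
    · have hyg : y < (g[x]'hxg).length := by omega
      have hyD : y < (a.getD x []).length := by rwa [List.getD_eq_getElem a [] hx]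
      rw [PySem.List.getElem?_enumerate, List.getElem?_eq_getElem hyg]
      rw [show ((PySem.List.pyRange 0 (((a[x]'hx).length : Nat) : Int) 1))[y]? = some ((0 : Int) + (y : Int)) from ?_]
      · simp only [Option.map_some, Option.some.injEq, zero_add]
        have hiff := pv_cell_iff a g k hk hrect hlen hrow hcell x y hx hyD
        have hgxy : (g.getD x []).getD y "" = (g[x]'hxg)[y]'hyg := by
          rw [List.getD_eq_getElem g [] hxg, List.getD_eq_getElem _ "" hyg]
        rw [hgxy] at hiff
        by_cases hN : pvNear a (k + 1) (x : Int) (y : Int)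
        · have h1 : ((g[x]'hxg)[y]'hyg == "V" || pvIsVirusAround g (x : Int) (y : Int)) = true := by
            rcases hiff.mpr hN with hV | hA
            · simp [hV]
            · simp [hA]
          have h2 := (pv_bInf_iff a (k + 1) (x : Int) (y : Int)).mpr hN
          rw [h1, h2]
        · have h1 : ((g[x]'hxg)[y]'hyg == "V" || pvIsVirusAround g (x : Int) (y : Int)) = false := by
            rw [Bool.or_eq_false_iff]
            constructor
            · rw [beq_eq_false_iff_ne]
              intro hV
              exact hN (hiff.mp (Or.inl hV))
            · rw [Bool.eq_false_iff]
              intro hA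
              exact hN (hiff.mp (Or.inr hA))
          have h2 : ((altViruses a).any (fun ij => decide (|(x : Int) - ij.1| + |(y : Int) - ij.2| ≤ k + 1))) = false := by
            rw [Bool.eq_false_iff]
            intro hB
            exact hN ((pv_bInf_iff a (k + 1) (x : Int) (y : Int)).mp hB)
          rw [h1, h2]
      · rw [PySem.List.getElem?_pyRange_one]
        simp [hy]
    · rw [List.getElem?_eq_none, List.getElem?_eq_none] <;> simp [hgrow] <;> omega
  · rw [List.getElem?_eq_none, List.getElem?_eq_none]
    · rw [pvSpecGrid_length]; omega
    · rw [pvStep_length]; omega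

theorem pvSpecGrid_rowlen (a : List (List String)) (k : Int) (x : Nat) (hx : x < a.length) :
    ((pvSpecGrid a k).getD x []).length = (a.getD x []).length := by
  rw [List.getD_eq_getElem?_getD, pvSpecGrid_getElem? a k x hx]
  simp [PySem.List.length_pyRange_one, List.getElem?_eq_getElem hx]

theorem pvSpecGrid_cell (a : List (List String)) (k : Int) (x y : Nat) (hx : x < a.length)
    (hy : y < (a.getD x []).length) :
    (((pvSpecGrid a k).getD x []).getD y "" = "V") ↔ pvNear a k (x : Int) (y : Int) := by
  have hy' : y < (a[x]'hx).length := by rwa [List.getD_eq_getElem a [] hx] at hy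
  rw [List.getD_eq_getElem?_getD, List.getD_eq_getElem?_getD, pvSpecGrid_getElem? a k x hx]
  simp only [Option.getD_some]
  rw [List.getElem?_map]
  rw [show (PySem.List.pyRange 0 (((a[x]'hx).length : Nat) : Int) 1)[y]? = some ((0 : Int) + (y : Int)) from ?_]
  · simp only [Option.map_some, Option.getD_some, zero_add]
    by_cases hB : ((altViruses a).any (fun ij => decide (|(x : Int) - ij.1| + |(y : Int) - ij.2| ≤ k))) = true
    · rw [if_pos hB]
      exact iff_of_true rfl ((pv_bInf_iff a k (x : Int) (y : Int)).mp hB)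
    · rw [if_neg hB]
      refine iff_of_false (by simp) ?_
      intro hN
      exact hB ((pv_bInf_iff a k (x : Int) (y : Int)).mpr hN)
  · rw [PySem.List.getElem?_pyRange_one]
    simp [hy']

theorem pv_foldl_iterate {α β : Type} (f : α → α) (l : List β) (init : α) :
    l.foldl (fun g _ => f g) init = f^[l.length] init := by
  induction l generalizing init with
  | nil => rfl
  | cons b t ih => simp [List.foldl_cons, ih, Function.iterate_succ_apply]

theorem pv_iter_spec (a : List (List String)) (s : Nat)
    (hrect : ∀ r ∈ a, r.length = (a.headD []).length) :
    pvStep^[s + 1] a = pvSpecGrid a ((s : Int) + 1) := by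
  induction s with
  | zero =>
    rw [Function.iterate_one]
    have hcell0 : ∀ x y : Nat, x < a.length → y < (a.getD x []).length →
        ((a.getD x []).getD y "" = "V" ↔ pvNear a 0 (x : Int) (y : Int)) := by
      intro x y hx hy
      constructor
      · intro hV
        exact ⟨x, y, hx, hy, hV, by simp⟩
      · rintro ⟨i, j, hi, hj, hV, hd⟩
        have n1 := abs_nonneg ((x : Int) - (i : Int))
        have n2 := abs_nonneg ((y : Int) - (j : Int))
        have e1 : |(x : Int) - (i : Int)| = 0 := by linarith
        have e2 : |(y : Int) - (j : Int)| = 0 := by linarith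
        have hxi : x = i := by have := abs_eq_zero.mp e1; omega
        have hyj : y = j := by have := abs_eq_zero.mp e2; omega
        rw [hxi, hyj]
        exact hV
    have h := pv_step_spec a a 0 le_rfl hrect rfl (fun _ _ => rfl) hcell0
    simpa using h
  | succ s ih =>
    rw [Function.iterate_succ_apply', ih]
    have h := pv_step_spec a (pvSpecGrid a ((s : Int) + 1)) ((s : Int) + 1) (by omega) hrect
      (pvSpecGrid_length a ((s : Int) + 1))
      (fun x hx => pvSpecGrid_rowlen a ((s : Int) + 1) x hx)
      (fun x y hx hy => pvSpecGrid_cell a ((s : Int) + 1) x y hx hy)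
    rw [h]
    have hc : ((s : Int) + 1) + 1 = (((s + 1 : Nat) : Int) + 1) := by push_cast; ring
    rw [hc]

theorem pv_final (apple : List (List String)) (n : Int)
    (hpre : n ≤ 0 ∨ ∀ r ∈ apple, r.length = (apple.headD []).length) :
    infect_apple apple n = infect_apple_alt apple n := by
  by_cases hn : n ≤ 0
  · rw [infect_apple, infect_apple_alt, if_pos hn, PySem.List.pyRange_one_eq_nil hn]
    rfl
  · have hrect := hpre.resolve_left hn
    rw [infect_apple, pv_foldl_iterate, PySem.List.length_pyRange_one]
    have h1 : (n - 0).toNat = (n.toNat - 1) + 1 := by omega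
    rw [h1, pv_iter_spec apple (n.toNat - 1) hrect]
    have h2 : ((n.toNat - 1 : Nat) : Int) + 1 = n := by omega
    rw [h2, infect_apple_alt, if_neg hn]
    rfl

-- ===== VERDICT (by name: the statement is the Claim_ definition above) =====
theorem infect_apple_spec : Claim_equal_infect_apple := by
  intro apple n _dom hpre
  unfold Pre_infect_apple at hpre
  unfold Spec_infect_apple
  exact pv_final apple n hpre
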